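-- pv_equiv track=rewrite | github.com/NaayoungKwon/AlgorithmStudy | 프로그래머스/3/12987. 숫자 게임/숫자 게임.py | solution
-- ===== SOURCE A (Python) =====
-- def solution(A, B):
--     answer = 0
--     A.sort()
--     B.sort()
--     s = 0
--     for a in A:
--         flag = False
--         for i in range(s, len(B)):
--             if a < B[i]:
--                 s = i+1
--                 answer += 1
--                 flag = True
--                 break
--         if flag == False:
--             return answer
--
--     return answer
-- ===== SOURCE B (Python) =====
-- def solution(A, B):
--     A.sort()
--     B.sort()
--     n, m = len(A), len(B)
--
--     def wins(k):
--         # k wins are achievable iff the k largest B cards pairwise beat the k smallest A cards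
--         return all(A[t] < B[m - k + t] for t in range(k))
--
--     lo, hi = 0, min(n, m)
--     while lo < hi:
--         mid = (lo + hi + 1) // 2
--         if wins(mid):
--             lo = mid
--         else:
--             hi = mid - 1
--     return lo
-- ===== Notes on version B (the rewrite author's own statement) =====
-- stated objective: alternative
-- what changed: Instead of A's greedy matching scan over B with a resumable inner loop, B binary-searches the answer k, checking feasibility by pairing the k largest B cards against the k smallest A cards.
import Mathlib
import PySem

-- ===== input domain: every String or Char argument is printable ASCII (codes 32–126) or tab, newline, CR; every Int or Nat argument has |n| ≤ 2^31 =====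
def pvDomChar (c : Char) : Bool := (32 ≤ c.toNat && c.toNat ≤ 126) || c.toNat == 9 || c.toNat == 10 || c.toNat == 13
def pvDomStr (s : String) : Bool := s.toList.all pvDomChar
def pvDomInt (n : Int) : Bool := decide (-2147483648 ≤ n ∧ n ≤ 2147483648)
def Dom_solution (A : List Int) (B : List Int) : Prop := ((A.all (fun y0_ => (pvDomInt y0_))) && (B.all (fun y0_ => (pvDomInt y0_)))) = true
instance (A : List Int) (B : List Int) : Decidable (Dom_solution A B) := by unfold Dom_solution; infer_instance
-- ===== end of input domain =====

-- B replaces A's greedy matching scan (nested loop with break flag and mid-loop early return)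
-- by a binary search on the answer k, checking feasibility by pairing the k largest B cards
-- against the k smallest A cards; both Pythons sort A and B in place — the theorems here are
-- about the return value only.

-- ===== PORT A =====
-- inner 'for i in range(s, len(B)): if a < B[i]: break' — returns the break index, none if no break;
-- fuel (always supplied as B's length, an upper bound on the remaining iterations) only makes the
-- index recursion structural, it never cuts the loop short
def pvInnerA (Bs : List Int) (a : Int) : Nat → Nat → Option Nat
  | 0, _ => none
  | fuel + 1, i =>
      if h : i < Bs.length then
        if a < Bs[i] then some i else pvInnerA Bs a fuel (i + 1)
      else none

-- outer 'for a in A' with the flag/early-return behaviour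
def pvLoopA (Bs : List Int) : List Int → Int → Nat → Int
  | [], answer, _ => answer
  | a :: rest, answer, s =>
      match pvInnerA Bs a Bs.length s with
      | some i => pvLoopA Bs rest (answer + 1) (i + 1)
      | none => answer

def solution (A : List Int) (B : List Int) : Int :=
  pvLoopA (PySem.List.sorted B (fun x => x)) (PySem.List.sorted A (fun x => x)) 0 0

-- ===== PORT B =====
-- wins(k) of Source B: all(A[t] < B[m-k+t] for t in range(k)); the binary search only calls it with
-- k ≤ min(n,m), so every index is in range and the Nat subtraction and getD defaults never fire
def pvWins (As Bs : List Int) (k : Nat) : Bool :=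
  (List.range k).all (fun t => decide (As.getD t 0 < Bs.getD (Bs.length - k + t) 0))

-- the while-loop 'while lo < hi: mid = (lo+hi+1)//2; …' of Source B; lo,hi are the nonnegative ints
-- of Source B; fuel (supplied as hi - lo, which bounds the iteration count since hi - lo shrinks each
-- pass) only makes the recursion structural, it never cuts the loop short
def pvBS (As Bs : List Int) : Nat → Nat → Nat → Nat
  | 0, lo, _ => lo
  | fuel + 1, lo, hi =>
      if lo < hi then
        if pvWins As Bs ((lo + hi + 1) / 2) then pvBS As Bs fuel ((lo + hi + 1) / 2) hi
        else pvBS As Bs fuel lo ((lo + hi + 1) / 2 - 1)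
      else lo

def solution_alt (A : List Int) (B : List Int) : Int :=
  (pvBS (PySem.List.sorted A (fun x => x)) (PySem.List.sorted B (fun x => x))
    (min (PySem.List.sorted A (fun x => x)).length (PySem.List.sorted B (fun x => x)).length) 0
    (min (PySem.List.sorted A (fun x => x)).length (PySem.List.sorted B (fun x => x)).length) : Int)

-- ===== PRECONDITION & SPEC =====
def Spec_solution (A : List Int) (B : List Int) (out : Int) : Prop := out = solution_alt A B
instance (A : List Int) (B : List Int) (out : Int) : Decidable (Spec_solution A B out) := by unfold Spec_solution; infer_instance

-- ===== CLAIM (what is proved, stated in full; the proofs are below) =====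
def Claim_equal_solution : Prop := ∀ (A : List Int) (B : List Int), Dom_solution A B → Spec_solution A B (solution A B)

-- ===== LEMMAS AND PROOFS =====

-- the common mathematical middle ground: the plain structural greedy count
def pvG : List Int → List Int → Nat
  | [], _ => 0
  | _ :: _, [] => 0
  | a :: as, b :: bs => if a < b then pvG as bs + 1 else pvG (a :: as) bs
termination_by structural _ Bs => Bs

-- the feasibility predicate, as a Prop
def pvW (As Bs : List Int) (k : Nat) : Prop :=
  ∀ t, t < k → As.getD t 0 < Bs.getD (Bs.length - k + t) 0

theorem pvWins_iff (As Bs : List Int) (k : Nat) : pvWins As Bs k = true ↔ pvW As Bs k := by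
  simp [pvWins, pvW, List.all_eq_true, List.mem_range]

theorem pvG_le : ∀ (As Bs : List Int), pvG As Bs ≤ min As.length Bs.length := by
  intro As Bs
  induction Bs generalizing As with
  | nil => cases As <;> simp [pvG]
  | cons b bs ih =>
      cases As with
      | nil => simp [pvG]
      | cons a as =>
          by_cases h : a < b
          · have := ih as
            simp only [pvG, if_pos h, List.length_cons, Nat.le_min] at *
            omega
          · have := ih (a :: as)
            simp only [pvG, if_neg h, List.length_cons, Nat.le_min] at *
            omega


-- ---- A-side: the port of A computes the plain greedy count pvG ----

theorem pvInnerA_fuel_irrel (Bs : List Int) (a : Int) :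
    ∀ fuel fuel' i, Bs.length ≤ fuel + i → Bs.length ≤ fuel' + i →
      pvInnerA Bs a fuel i = pvInnerA Bs a fuel' i := by
  intro fuel
  induction fuel with
  | zero =>
      intro fuel' i h h'
      cases fuel' with
      | zero => rfl
      | succ fuel' =>
          rw [pvInnerA, pvInnerA]
          have : ¬ i < Bs.length := by omega
          simp [this]
  | succ fuel ih =>
      intro fuel' i h h'
      cases fuel' with
      | zero =>
          rw [pvInnerA, pvInnerA]
          have : ¬ i < Bs.length := by omega
          simp [this]
      | succ fuel' =>
          rw [pvInnerA, pvInnerA]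
          by_cases hi : i < Bs.length
          · simp only [hi, dif_pos]
            by_cases hlt : a < Bs[i]
            · simp [hlt]
            · simp only [hlt]
              exact ih fuel' (i + 1) (by omega) (by omega)
          · simp [hi]

theorem pvInnerA_none (Bs : List Int) (a : Int) (fuel s : Nat) (h : Bs.length ≤ s) :
    pvInnerA Bs a fuel s = none := by
  cases fuel with
  | zero => rfl
  | succ fuel =>
      rw [pvInnerA]
      have : ¬ s < Bs.length := by omega
      simp [this]

theorem pvInnerA_hit (Bs : List Int) (a : Int) (s : Nat) (hs : s < Bs.length)
    (hlt : a < Bs[s]) : pvInnerA Bs a Bs.length s = some s := by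
  rw [pvInnerA_fuel_irrel Bs a Bs.length (Bs.length - s) s (by omega) (by omega)]
  obtain ⟨f, hf⟩ : ∃ f, Bs.length - s = f + 1 := ⟨Bs.length - s - 1, by omega⟩
  rw [hf, pvInnerA]
  simp [hs, hlt]

theorem pvInnerA_skip (Bs : List Int) (a : Int) (s : Nat) (hs : s < Bs.length)
    (hlt : ¬ a < Bs[s]) : pvInnerA Bs a Bs.length s = pvInnerA Bs a Bs.length (s + 1) := by
  rw [pvInnerA_fuel_irrel Bs a Bs.length (Bs.length - s) s (by omega) (by omega)]
  obtain ⟨f, hf⟩ : ∃ f, Bs.length - s = f + 1 := ⟨Bs.length - s - 1, by omega⟩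
  rw [hf, pvInnerA]
  simp only [hs, dif_pos, hlt]
  exact pvInnerA_fuel_irrel Bs a f Bs.length (s + 1) (by omega) (by omega)

theorem pvLoopA_eq_pvG (Bs : List Int) :
    ∀ (tl : List Int) (s : Nat) (ans : Int),
      pvLoopA Bs tl ans s = ans + (pvG tl (Bs.drop s) : Int) := by
  intro tl
  induction tl with
  | nil => intro s ans; simp [pvLoopA, pvG]
  | cons a rest ih =>
      have H : ∀ d s (ans : Int), Bs.length - s ≤ d →
          pvLoopA Bs (a :: rest) ans s = ans + (pvG (a :: rest) (Bs.drop s) : Int) := by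
        intro d
        induction d with
        | zero =>
            intro s ans hle
            have hs : Bs.length ≤ s := by omega
            rw [pvLoopA, pvInnerA_none Bs a _ s hs, List.drop_eq_nil_of_le hs]
            simp [pvG]
        | succ d ihd =>
            intro s ans hle
            by_cases hs : s < Bs.length
            · have hdrop : Bs.drop s = Bs[s] :: Bs.drop (s + 1) := List.drop_eq_getElem_cons hs
              by_cases hlt : a < Bs[s]
              · rw [pvLoopA, pvInnerA_hit Bs a s hs hlt]
                have hred : (match (some s : Option Nat) with
                    | some i => pvLoopA Bs rest (ans + 1) (i + 1)
                    | none => ans) = pvLoopA Bs rest (ans + 1) (s + 1) := rfl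
                rw [hred, ih (s + 1) (ans + 1), hdrop]
                simp only [pvG, hlt, if_pos]
                push_cast
                ring
              · have step : pvLoopA Bs (a :: rest) ans s = pvLoopA Bs (a :: rest) ans (s + 1) := by
                  rw [pvLoopA, pvLoopA, pvInnerA_skip Bs a s hs hlt]
                rw [step, ihd (s + 1) ans (by omega), hdrop]
                simp only [pvG, hlt, if_neg, not_false_iff]
            · have hsle : Bs.length ≤ s := by omega
              rw [pvLoopA, pvInnerA_none Bs a _ s hsle, List.drop_eq_nil_of_le hsle]
              simp [pvG]
      intro s ans
      exact H (Bs.length - s) s ans le_rfl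

-- ---- the feasibility predicate on sorted lists ----

theorem getD_mono (l : List Int) (h : l.Pairwise (· ≤ ·)) (i j : Nat) (hij : i ≤ j)
    (hj : j < l.length) : l.getD i 0 ≤ l.getD j 0 := by
  rw [List.getD_eq_getElem l 0 (lt_of_le_of_lt hij hj), List.getD_eq_getElem l 0 hj]
  rcases Nat.eq_or_lt_of_le hij with rfl | hlt
  · exact le_rfl
  · exact List.pairwise_iff_getElem.mp h i j _ _ hlt

theorem pvW_mono (As Bs : List Int) (hB : Bs.Pairwise (· ≤ ·)) (j k : Nat)
    (hjk : j ≤ k) (hk : k ≤ Bs.length) (hw : pvW As Bs k) : pvW As Bs j := by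
  intro t ht
  refine lt_of_lt_of_le (hw t (lt_of_lt_of_le ht hjk)) (getD_mono Bs hB _ _ ?_ ?_)
  · omega
  · omega

theorem pvW_pvG : ∀ As Bs : List Int, As.Pairwise (· ≤ ·) → Bs.Pairwise (· ≤ ·) →
    pvW As Bs (pvG As Bs) := by
  intro As Bs
  induction Bs generalizing As with
  | nil => intro _ _ t ht; cases As <;> simp [pvG] at ht
  | cons b bs ih =>
      intro hA hB
      cases As with
      | nil => intro t ht; simp [pvG] at ht
      | cons a as =>
          by_cases hab : a < b
          · have hc' := pvG_le as bs
            rw [pvG, if_pos hab]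
            intro t ht
            match t with
            | 0 =>
                simp only [List.getD_cons_zero]
                by_cases hcb : pvG as bs = bs.length
                · have hidx : (b :: bs).length - (pvG as bs + 1) + 0 = 0 := by simp; omega
                  rw [hidx, List.getD_cons_zero]
                  exact hab
                · have hlt' : pvG as bs < bs.length := by simp at hc'; omega
                  have hidx : (b :: bs).length - (pvG as bs + 1) + 0
                      = (bs.length - pvG as bs - 1) + 1 := by simp; omega
                  rw [hidx, List.getD_cons_succ]
                  have hmem : bs.getD (bs.length - pvG as bs - 1) 0 ∈ bs := by
                    rw [List.getD_eq_getElem bs 0 (by omega)]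
                    exact List.getElem_mem _
                  exact lt_of_lt_of_le hab ((List.pairwise_cons.mp hB).1 _ hmem)
            | u + 1 =>
                have hu : u < pvG as bs := by omega
                have h1 := ih as (List.pairwise_cons.mp hA).2 (List.pairwise_cons.mp hB).2 u hu
                have hidx : (b :: bs).length - (pvG as bs + 1) + (u + 1)
                    = (bs.length - pvG as bs + u) + 1 := by simp; omega
                rw [hidx, List.getD_cons_succ, List.getD_cons_succ]
                exact h1
          · have hcle := pvG_le (a :: as) bs
            rw [pvG, if_neg hab]
            intro t ht
            have h1 := ih (a :: as) hA (List.pairwise_cons.mp hB).2 t ht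
            have hidx : (b :: bs).length - pvG (a :: as) bs + t
                = (bs.length - pvG (a :: as) bs + t) + 1 := by simp at hcle ⊢; omega
            rw [hidx, List.getD_cons_succ]
            exact h1

theorem pvW_not : ∀ As Bs : List Int, As.Pairwise (· ≤ ·) → Bs.Pairwise (· ≤ ·) →
    pvG As Bs + 1 ≤ min As.length Bs.length → ¬ pvW As Bs (pvG As Bs + 1) := by
  intro As Bs
  induction Bs generalizing As with
  | nil => intro _ _ hlt; cases As <;> simp [pvG] at hlt
  | cons b bs ih =>
      intro hA hB hlt
      cases As with
      | nil => simp [pvG] at hlt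
      | cons a as =>
          by_cases hab : a < b
          · rw [pvG, if_pos hab] at hlt ⊢
            simp only [List.length_cons, Nat.le_min] at hlt
            intro hw
            apply ih as (List.pairwise_cons.mp hA).2 (List.pairwise_cons.mp hB).2
              (by simp only [Nat.le_min]; omega)
            intro u hu
            have h1 := hw (u + 1) (by omega)
            have hidx : (b :: bs).length - (pvG as bs + 1 + 1) + (u + 1)
                = (bs.length - (pvG as bs + 1) + u) + 1 := by simp; omega
            rw [hidx, List.getD_cons_succ, List.getD_cons_succ] at h1
            exact h1
          · rw [pvG, if_neg hab] at hlt ⊢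
            simp only [List.length_cons, Nat.le_min] at hlt
            intro hw
            by_cases hcb : pvG (a :: as) bs + 1 ≤ bs.length
            · apply ih (a :: as) hA (List.pairwise_cons.mp hB).2
                (by simp only [List.length_cons, Nat.le_min]; omega)
              intro u hu
              have h1 := hw u (by omega)
              have hidx : (b :: bs).length - (pvG (a :: as) bs + 1) + u
                  = (bs.length - (pvG (a :: as) bs + 1) + u) + 1 := by simp; omega
              rw [hidx, List.getD_cons_succ] at h1
              exact h1
            · have hceq : pvG (a :: as) bs = bs.length := by
                have := pvG_le (a :: as) bs
                simp only [Nat.le_min] at this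
                omega
              have h0 := hw 0 (by omega)
              have hidx : (b :: bs).length - (pvG (a :: as) bs + 1) + 0 = 0 := by simp; omega
              rw [hidx, List.getD_cons_zero, List.getD_cons_zero] at h0
              exact hab h0

-- ---- B-side: the binary search returns the unique feasibility threshold ----

theorem pvBS_eq (As Bs : List Int) (c : Nat)
    (hYes : ∀ k, k ≤ c → pvW As Bs k)
    (hNot : ∀ k, c < k → k ≤ min As.length Bs.length → ¬ pvW As Bs k) :
    ∀ fuel lo hi, hi - lo ≤ fuel → lo ≤ c → c ≤ hi → hi ≤ min As.length Bs.length →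
      pvBS As Bs fuel lo hi = c := by
  intro fuel
  induction fuel with
  | zero =>
      intro lo hi hd hlo hhi hmin
      rw [pvBS]
      omega
  | succ fuel ihd =>
      intro lo hi hd hlo hhi hmin
      by_cases hlh : lo < hi
      · rw [pvBS, if_pos hlh]
        by_cases hwm : pvWins As Bs ((lo + hi + 1) / 2)
        · rw [if_pos hwm]
          have hmc : (lo + hi + 1) / 2 ≤ c := by
            by_contra hmc
            exact hNot ((lo + hi + 1) / 2) (by omega) (by omega)
              ((pvWins_iff As Bs _).mp hwm)
          exact ihd ((lo + hi + 1) / 2) hi (by omega) hmc hhi hmin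
        · rw [if_neg hwm]
          have hcm : c < (lo + hi + 1) / 2 := by
            by_contra hcm
            exact hwm ((pvWins_iff As Bs _).mpr (hYes _ (by omega)))
          exact ihd lo ((lo + hi + 1) / 2 - 1) (by omega) hlo (by omega) (by omega)
      · rw [pvBS, if_neg hlh]
        omega

-- ===== VERDICT (by name: the statement is the Claim_ definition above) =====
theorem solution_spec : Claim_equal_solution := by
  intro A B _
  unfold Spec_solution solution solution_alt
  have hA : (PySem.List.sorted A (fun x => x)).Pairwise (· ≤ ·) :=
    PySem.List.sorted_pairwise A (fun x => x)
  have hB : (PySem.List.sorted B (fun x => x)).Pairwise (· ≤ ·) :=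
    PySem.List.sorted_pairwise B (fun x => x)
  set As := PySem.List.sorted A (fun x => x) with hAs
  set Bs := PySem.List.sorted B (fun x => x) with hBs
  have hG := pvLoopA_eq_pvG Bs As 0 0
  rw [List.drop_zero] at hG
  rw [hG]
  have hcle := pvG_le As Bs
  have hW := pvW_pvG As Bs hA hB
  have hYes : ∀ k, k ≤ pvG As Bs → pvW As Bs k := by
    intro k hk
    exact pvW_mono As Bs hB k (pvG As Bs) hk (by omega) hW
  have hNot : ∀ k, pvG As Bs < k → k ≤ min As.length Bs.length → ¬ pvW As Bs k := by
    intro k hck hkmin hwk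
    exact pvW_not As Bs hA hB (by omega)
      (pvW_mono As Bs hB (pvG As Bs + 1) k (by omega) (by omega) hwk)
  rw [pvBS_eq As Bs (pvG As Bs) hYes hNot (min As.length Bs.length) 0
    (min As.length Bs.length) (by omega) (Nat.zero_le _) (by omega) le_rfl]
  simp
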